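-- pv_equiv track=rewrite | github.com/SeongBinYoon/Algorithm | codes/Programmers/implementation/한번만등장한문자.py | solution
-- ===== SOURCE A (Python) =====
-- def solution(s):
--     answer = ''
--     res = []
--     for ch in s:
--         if s.count(ch) == 1:
--             res.append(ch)
--     res.sort()
--     for word in res:
--         answer += word
--     return answer
-- ===== SOURCE B (Python) =====
-- def solution(s):
--     # Sort once, then a single run-length pass over the sorted characters:
--     # a character appears exactly once in s iff its run in sorted(s) has length 1.
--     # Runs come out in sorted order, so no second sort is needed.
--     t = sorted(s)
--     out = []
--     i, n = 0, len(t)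
--     while i < n:
--         j = i + 1
--         while j < n and t[j] == t[i]:
--             j += 1
--         if j == i + 1:
--             out.append(t[i])
--         i = j
--     return ''.join(out)
-- ===== Notes on version B (the rewrite author's own statement) =====
-- stated objective: faster
-- what changed: Replaces A's per-character s.count scan (then sorting the kept characters) by sorting s once and doing a single run-length pass over the sorted characters, keeping runs of length 1.
import Mathlib
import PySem

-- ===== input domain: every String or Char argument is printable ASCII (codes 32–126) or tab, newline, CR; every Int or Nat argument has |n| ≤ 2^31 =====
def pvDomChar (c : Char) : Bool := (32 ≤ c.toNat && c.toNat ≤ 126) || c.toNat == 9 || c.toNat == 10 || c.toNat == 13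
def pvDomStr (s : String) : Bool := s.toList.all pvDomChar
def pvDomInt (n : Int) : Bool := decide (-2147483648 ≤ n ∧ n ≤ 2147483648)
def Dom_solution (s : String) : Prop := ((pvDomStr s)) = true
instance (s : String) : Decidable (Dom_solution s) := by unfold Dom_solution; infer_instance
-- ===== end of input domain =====

-- B replaces A's per-character s.count scan (then sorting the kept characters) by one
-- sort of s followed by a single run-length pass over the sorted characters (objective: faster).

-- ===== PORT A =====
def solution (s : String) : String :=
  -- res = []; for ch in s: if s.count(ch) == 1: res.append(ch)
  let res : List Char := s.toList.foldl
    (fun res ch => if PySem.Str.count s (String.ofList [ch]) == 1 then res ++ [ch] else res) []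
  -- res.sort()
  let res := PySem.List.sorted res (fun x => x) false
  -- answer = ''; for word in res: answer += word
  String.ofList (res.foldl (fun answer word => answer ++ [word]) [])

-- ===== PORT B =====
-- the outer while loop of Source B: recursion on the suffix t[i:]; the inner while loop
-- finds the run of the head character (takeWhile/dropWhile); kept iff j == i+1 (run length 1)
def altRuns (t : List Char) : List Char :=
  match t with
  | [] => []
  | c :: rest =>
      (if (rest.takeWhile (fun x => x == c)).isEmpty then [c] else []) ++
        altRuns (rest.dropWhile (fun x => x == c))
termination_by t.length
decreasing_by
  simp only [List.length_cons]
  exact Nat.lt_succ_of_le (List.length_dropWhile_le _ _)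

def solution_alt (s : String) : String :=
  String.ofList (altRuns (PySem.List.sorted s.toList (fun x => x) false))

-- ===== PRECONDITION & SPEC =====
def Spec_solution (s : String) (out : String) : Prop := out = solution_alt s
instance (s : String) (out : String) : Decidable (Spec_solution s out) := by unfold Spec_solution; infer_instance

-- ===== CLAIM (what is proved, stated in full; the proofs are below) =====
def Claim_equal_solution : Prop := ∀ (s : String), Dom_solution s → Spec_solution s (solution s)

-- ===== LEMMAS AND PROOFS =====

-- Python str.count of a single-character substring is List.count
lemma count_go_single (c : Char) :
    ∀ (l : List Char) (fuel acc : Nat), l.length ≤ fuel →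
      PySem.Chars.count.go [c] fuel l acc = acc + l.count c := by
  intro l
  induction l with
  | nil =>
      intro fuel acc _
      cases fuel <;> simp [PySem.Chars.count.go]
  | cons h t ih =>
      intro fuel acc hle
      cases fuel with
      | zero => simp at hle
      | succ f =>
          simp only [List.length_cons, Nat.succ_le_succ_iff] at hle
          by_cases hc : c = h
          · subst hc
            simp [PySem.Chars.count.go, List.isPrefixOf, ih f (acc + 1) hle]
            omega
          · simp [PySem.Chars.count.go, List.isPrefixOf, hc, ih f acc hle,
              List.count_cons_of_ne (fun h' => hc h'.symm)]

lemma count_single (cs : List Char) (c : Char) :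
    PySem.Chars.count cs [c] = cs.count c := by
  simp [PySem.Chars.count, count_go_single c cs cs.length 0 le_rfl]

-- run-length pass on a sorted list = filter by "count in that list is 1"
lemma altRuns_eq_filter :
    ∀ (t : List Char), t.Pairwise (· ≤ ·) →
      altRuns t = t.filter (fun x => t.count x == 1) := by
  intro t
  induction t using altRuns.induct with
  | case1 => intro _; simp [altRuns]
  | case2 c rest ih =>
      intro hp
      have hsplit : rest = rest.takeWhile (fun x => x == c) ++ rest.dropWhile (fun x => x == c) :=
        (List.takeWhile_append_dropWhile).symm
      have htkc : ∀ x ∈ rest.takeWhile (fun x => x == c), x = c := by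
        intro x hx
        simpa using List.mem_takeWhile_imp hx
      have hrest_le : ∀ x ∈ rest, c ≤ x := (List.pairwise_cons.mp hp).1
      have hdr_pair : (rest.dropWhile (fun x => x == c)).Pairwise (· ≤ ·) :=
        ((List.pairwise_cons.mp hp).2).sublist (List.dropWhile_sublist _)
      have hdr_ne : ∀ x ∈ rest.dropWhile (fun x => x == c), x ≠ c := by
        intro x hx
        cases hdrc : rest.dropWhile (fun x => x == c) with
        | nil => rw [hdrc] at hx; simp at hx
        | cons d ds =>
            have hdne : (d == c) = false := by
              have h0 := List.head?_dropWhile_not (fun x => x == c) rest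
              rw [hdrc] at h0
              simpa using h0
            have hdmem : d ∈ rest := (List.dropWhile_sublist _).mem (by rw [hdrc]; simp)
            have hcd : c < d := lt_of_le_of_ne (hrest_le d hdmem)
              (by rintro rfl; simp at hdne)
            rw [hdrc] at hx hdr_pair
            rcases List.mem_cons.mp hx with rfl | hxs
            · exact ne_of_gt hcd
            · exact ne_of_gt (lt_of_lt_of_le hcd ((List.pairwise_cons.mp hdr_pair).1 x hxs))
      have hcount_tk : (rest.takeWhile (fun x => x == c)).count c
          = (rest.takeWhile (fun x => x == c)).length := by
        rw [List.count_eq_length]; intro x hx; exact (htkc x hx).symm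
      have hcount_dr0 : (rest.dropWhile (fun x => x == c)).count c = 0 := by
        rw [List.count_eq_zero]; intro hmem; exact hdr_ne c hmem rfl
      have hcc : (c :: rest).count c = 1 + (rest.takeWhile (fun x => x == c)).length := by
        rw [List.count_cons_self]
        conv_lhs => rw [hsplit]
        rw [List.count_append, hcount_tk, hcount_dr0]
        omega
      have hcount_dr : ∀ x ∈ rest.dropWhile (fun x => x == c),
          (c :: rest).count x = (rest.dropWhile (fun x => x == c)).count x := by
        intro x hx
        have hxne : x ≠ c := hdr_ne x hx
        rw [List.count_cons_of_ne (fun h' => hxne h'.symm)]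
        conv_lhs => rw [hsplit]
        rw [List.count_append]
        have : (rest.takeWhile (fun x => x == c)).count x = 0 := by
          rw [List.count_eq_zero]; intro hmem; exact hxne (htkc x hmem)
        omega
      have hfil_tk : (rest.takeWhile (fun x => x == c)).filter
          (fun x => (c :: rest).count x == 1) = [] := by
        rw [List.filter_eq_nil_iff]
        intro x hx
        obtain rfl : x = c := htkc x hx
        have hlen : (rest.takeWhile (fun y => y == x)).length ≠ 0 := by
          intro h0
          rw [List.length_eq_zero_iff] at h0
          simp [h0] at hx
        simp only [hcc, beq_iff_eq]
        omega
      have hfil_dr : (rest.dropWhile (fun x => x == c)).filter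
            (fun x => (c :: rest).count x == 1)
          = (rest.dropWhile (fun x => x == c)).filter
            (fun x => (rest.dropWhile (fun x => x == c)).count x == 1) := by
        apply List.filter_congr
        intro x hx
        simp [hcount_dr x hx]
      have hrest_fil : rest.filter (fun x => (c :: rest).count x == 1)
          = (rest.dropWhile (fun x => x == c)).filter
            (fun x => (rest.dropWhile (fun x => x == c)).count x == 1) := by
        have h := congrArg (List.filter (fun x => (c :: rest).count x == 1)) hsplit
        rw [List.filter_append, hfil_tk, List.nil_append, hfil_dr] at h
        exact h
      rw [altRuns, List.filter_cons, hrest_fil, ih hdr_pair]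
      by_cases hemp : (rest.takeWhile (fun x => x == c)).isEmpty
      · have htk0 : (rest.takeWhile (fun x => x == c)) = [] := by
          simpa [List.isEmpty_iff] using hemp
        have hcond : ((c :: rest).count c == 1) = true := by simp [hcc, htk0]
        rw [hcond, hemp]
        simp
      · have hlen : (rest.takeWhile (fun x => x == c)).length ≠ 0 := by
          intro h0
          rw [List.length_eq_zero_iff] at h0
          simp [h0] at hemp
        have hcond : ((c :: rest).count c == 1) = false := by
          simp only [hcc, beq_eq_false_iff_ne, ne_eq]
          omega
        have hempf : (rest.takeWhile (fun x => x == c)).isEmpty = false :=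
          Bool.eq_false_iff.mpr hemp
        rw [hcond, hempf]
        simp

-- sorting then filtering = filtering then sorting (identity key)
lemma sorted_filter (cs : List Char) (p : Char → Bool) :
    PySem.List.sorted (cs.filter p) (fun x => x) false
      = (PySem.List.sorted cs (fun x => x) false).filter p := by
  apply PySem.List.sorted_id_eq_of_perm_of_pairwise
  · exact (PySem.List.sorted_perm cs (fun x => x) false).filter p
  · exact (PySem.List.sorted_pairwise cs (fun x => x)).sublist List.filter_sublist

lemma foldl_append_chars (l : List Char) :
    l.foldl (fun answer word => answer ++ [word]) ([] : List Char) = l := by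
  simpa using PySem.List.foldl_append_singleton_eq_map (fun x => x) l []

theorem solution_spec_aux (s : String) : solution s = solution_alt s := by
  unfold solution solution_alt
  simp only [foldl_append_chars]
  have hA : s.toList.foldl
      (fun res ch => if PySem.Str.count s (String.ofList [ch]) == 1 then res ++ [ch] else res) []
      = s.toList.filter (fun ch => PySem.Str.count s (String.ofList [ch]) == 1) := by
    simpa using PySem.List.foldl_append_if
      (fun ch => PySem.Str.count s (String.ofList [ch]) == 1) (fun x => x) s.toList []
  rw [hA]
  have hfil : s.toList.filter (fun ch => PySem.Str.count s (String.ofList [ch]) == 1)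
      = s.toList.filter (fun ch => s.toList.count ch == 1) := by
    apply List.filter_congr
    intro x _
    simp [PySem.Str.count_eq, count_single]
  rw [hfil, sorted_filter]
  congr 1
  rw [altRuns_eq_filter _ (PySem.List.sorted_pairwise s.toList (fun x => x))]
  apply List.filter_congr
  intro x _
  have : (PySem.List.sorted s.toList (fun x => x) false).count x = s.toList.count x :=
    (PySem.List.sorted_perm s.toList (fun x => x) false).count_eq x
  simp [this]

-- ===== VERDICT (by name: the statement is the Claim_ definition above) =====
theorem solution_spec : Claim_equal_solution := by
  intro s _
  unfold Spec_solution
  exact solution_spec_aux s
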